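-- pv_equiv track=rewrite | github.com/renta0426/NVIDIA-Nemotron-Model-Reasoning-Challenge | data/symbol_rule_analysis_2026-04-20/analyze_symbol_rules.py | core_make_symbol_map
-- ===== SOURCE A (Python) =====
-- def core_make_symbol_map(symbol_sequence: str, digit_sequence: str) -> dict[str, str] | None:
--     mapping: dict[str, str] = {}
--     used_digits: dict[str, str] = {}
--     for symbol, digit in zip(symbol_sequence, digit_sequence):
--         if symbol in mapping and mapping[symbol] != digit:
--             return None
--         if symbol not in mapping and digit in used_digits and used_digits[digit] != symbol:
--             return None
--         mapping[symbol] = digit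
--         used_digits[digit] = symbol
--     return mapping
-- ===== SOURCE B (Python) =====
-- def core_make_symbol_map(symbol_sequence: str, digit_sequence: str) -> dict[str, str] | None:
--     pairs = list(zip(symbol_sequence, digit_sequence))
--     mapping = dict(pairs)
--     reverse = dict(zip(digit_sequence, symbol_sequence))
--     if all(mapping[s] == d for s, d in pairs) and len(mapping) == len(reverse):
--         return mapping
--     return None
-- ===== Notes on version B (the rewrite author's own statement) =====
-- stated objective: alternative
-- what changed: B replaces A's incremental loop with two early-return guards and a maintained reverse dict by a bulk build: it constructs mapping = dict(pairs) and reverse = dict(zip(digits, symbols)) wholesale, then validates forward consistency with one all() pass over the pairs and bijectivity by comparing len(mapping) with len(reverse).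
import Mathlib
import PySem

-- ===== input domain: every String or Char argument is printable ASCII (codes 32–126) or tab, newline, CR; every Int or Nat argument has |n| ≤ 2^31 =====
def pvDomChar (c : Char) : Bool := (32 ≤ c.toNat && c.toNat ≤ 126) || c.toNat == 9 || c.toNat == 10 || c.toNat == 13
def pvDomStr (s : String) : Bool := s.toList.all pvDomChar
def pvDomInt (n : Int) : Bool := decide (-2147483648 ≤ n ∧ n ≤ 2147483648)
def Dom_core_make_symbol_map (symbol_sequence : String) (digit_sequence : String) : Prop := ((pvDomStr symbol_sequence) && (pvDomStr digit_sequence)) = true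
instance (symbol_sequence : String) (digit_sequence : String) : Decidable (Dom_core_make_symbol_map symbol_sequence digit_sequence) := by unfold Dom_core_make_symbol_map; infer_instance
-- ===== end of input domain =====

-- B replaces A's incremental two-dict loop with a bulk build: it constructs the forward
-- and reverse dicts wholesale from the zipped pairs and validates consistency and
-- injectivity with two global checks afterwards (objective: alternative decomposition).


-- ===== PORT A =====
-- A's loop over zip(symbol_sequence, digit_sequence), carrying both dicts (mapping, used_digits).
def pvLoopA : List (Char × Char) → PySem.Dict Char Char → PySem.Dict Char Char → Option (PySem.Dict Char Char)
  | [], m, _ => some m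
  | (s, d) :: t, m, u =>
    if m.contains s = true ∧ m.get? s ≠ some d then none
    else if m.contains s = false ∧ u.contains d = true ∧ u.get? d ≠ some s then none
    else pvLoopA t (m.insert s d) (u.insert d s)

def core_make_symbol_map (symbol_sequence : String) (digit_sequence : String) : Option (List (String × String)) :=
  (pvLoopA (symbol_sequence.toList.zip digit_sequence.toList) PySem.Dict.empty PySem.Dict.empty).map
    (fun m => m.items.map (fun p => (p.1.toString, p.2.toString)))

-- ===== PORT B =====
-- dict(pairs): fold the pairs into a dict (overwrite keeps position, value = last occurrence).
def pvDictOf (l : List (Char × Char)) : PySem.Dict Char Char :=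
  l.foldl (fun m p => m.insert p.1 p.2) PySem.Dict.empty

-- B builds mapping = dict(pairs) and reverse = dict(zip(digits, symbols)) wholesale, then
-- checks all(mapping[s] == d for s, d in pairs) and len(mapping) == len(reverse).
def core_make_symbol_map_alt (symbol_sequence : String) (digit_sequence : String) : Option (List (String × String)) :=
  let pairs := symbol_sequence.toList.zip digit_sequence.toList
  let mapping := pvDictOf pairs
  let reverse := pvDictOf (digit_sequence.toList.zip symbol_sequence.toList)
  if pairs.all (fun p => mapping.get? p.1 == some p.2) && (mapping.items.length == reverse.items.length)
  then some (mapping.items.map (fun p => (p.1.toString, p.2.toString)))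
  else none

-- ===== PRECONDITION & SPEC =====
def Spec_core_make_symbol_map (symbol_sequence : String) (digit_sequence : String) (out : Option (List (String × String))) : Prop := out = core_make_symbol_map_alt symbol_sequence digit_sequence
instance (symbol_sequence : String) (digit_sequence : String) (out : Option (List (String × String))) : Decidable (Spec_core_make_symbol_map symbol_sequence digit_sequence out) := by unfold Spec_core_make_symbol_map; infer_instance

-- ===== CLAIM (what is proved, stated in full; the proofs are below) =====
def Claim_equal_core_make_symbol_map : Prop := ∀ (symbol_sequence : String) (digit_sequence : String), Dom_core_make_symbol_map symbol_sequence digit_sequence → Spec_core_make_symbol_map symbol_sequence digit_sequence (core_make_symbol_map symbol_sequence digit_sequence)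

-- ===== LEMMAS AND PROOFS =====

-- Proof-only intermediate: the setdefault-style forward loop (first value wins, stop on conflict).
def pvLoopB : List (Char × Char) → PySem.Dict Char Char → Option (PySem.Dict Char Char)
  | [], m => some m
  | (s, d) :: t, m =>
    if (m.get? s).getD d ≠ d then none
    else pvLoopB t (m.setdefault s d)

-- "Functional": no key occurs with two different values.
def pvFnP (xs : List (Char × Char)) : Prop := ∀ p ∈ xs, ∀ q ∈ xs, p.1 = q.1 → p.2 = q.2

def pvFn (xs : List (Char × Char)) : Bool := xs.all (fun p => xs.all (fun q => !(p.1 == q.1) || (p.2 == q.2)))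

theorem pvFn_iff (xs : List (Char × Char)) : pvFn xs = true ↔ pvFnP xs := by
  simp only [pvFn, pvFnP, List.all_eq_true, Bool.or_eq_true, Bool.not_eq_true', beq_eq_false_iff_ne,
    ne_eq, beq_iff_eq]
  constructor
  · intro H p hp q hq he
    rcases H p hp q hq with hne | heq
    · exact absurd he hne
    · exact heq
  · intro H p hp q hq
    by_cases he : p.1 = q.1
    · exact Or.inr (H p hp q hq he)
    · exact Or.inl he

theorem pvFnP_congr (xs ys : List (Char × Char)) (h : ∀ a, a ∈ xs ↔ a ∈ ys) : pvFnP xs ↔ pvFnP ys := by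
  constructor <;> intro H p hp q hq
  · exact H p ((h p).mpr hp) q ((h q).mpr hq)
  · exact H p ((h p).mp hp) q ((h q).mp hq)

-- Invariant tying A's two dicts together: used_digits is exactly the inverse of mapping.
def pvInv (m u : PySem.Dict Char Char) : Prop :=
  ∀ s d : Char, m.get? s = some d ↔ u.get? d = some s

-- set(xs) keeps a subsequence of xs, so equal length forces xs to be duplicate-free.
theorem pv_ofList_sublist (xs : List Char) : List.Sublist (PySem.Set.ofList xs) xs := by
  induction xs with
  | nil => simp [PySem.Set.ofList_nil]
  | cons x t ih =>
    rw [PySem.Set.ofList_cons]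
    refine List.Sublist.cons₂ x (List.Sublist.trans ?_ ih)
    simp [PySem.Set.discard]

theorem pv_nodup_of_len (xs : List Char) (h : (PySem.Set.ofList xs).length = xs.length) :
    xs.Nodup := by
  have := (pv_ofList_sublist xs).eq_of_length h
  rw [← this]; exact PySem.Set.nodup_ofList xs

-- Re-inserting an existing binding leaves the dict unchanged.
theorem pv_insert_noop (m : PySem.Dict Char Char) (k v : Char) (hnd : m.keys.Nodup)
    (h : m.get? k = some v) : m.insert k v = m := by
  apply PySem.Dict.ext
  rw [PySem.Dict.items_insert_of_contains m v (by
    rw [PySem.Dict.contains_eq_isSome_get?, h]; rfl)]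
  have : ∀ p ∈ m.items, (if p.1 == k then (k, v) else p) = p := by
    intro p hp
    by_cases hk : p.1 = k
    · have hmem : (k, p.2) ∈ m.items := by rw [← hk]; simpa using hp
      have := PySem.Dict.get?_of_mem_items m hmem hnd
      rw [h] at this
      have hv : p.2 = v := (Option.some.inj this).symm
      simp [hk, hv, Prod.ext_iff]
    · simp [hk]
  rw [List.map_congr_left this]; simp

-- Under the invariant, mapping's values are duplicate-free.
theorem pv_values_nodup (m u : PySem.Dict Char Char) (hinv : pvInv m u)
    (hnd : m.keys.Nodup) : m.values.Nodup := by
  have hitems : m.items.Nodup := hnd.of_map _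
  refine hitems.map_on ?_
  intro p hp q hq hpq
  have h1 : m.get? p.1 = some p.2 := PySem.Dict.get?_of_mem_items m (by simpa using hp) hnd
  have h2 : m.get? q.1 = some q.2 := PySem.Dict.get?_of_mem_items m (by simpa using hq) hnd
  have hu1 := (hinv p.1 p.2).mp h1
  have hu2 := (hinv q.1 q.2).mp h2
  rw [hpq] at hu1
  rw [hu1] at hu2
  have hk : p.1 = q.1 := Option.some.inj hu2
  have : p.2 = q.2 := hpq
  exact Prod.ext hk this

-- pvLoopB never removes or changes an existing binding.
theorem pv_loopB_mono (l : List (Char × Char)) (m m' : PySem.Dict Char Char)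
    (h : pvLoopB l m = some m') : ∀ k v, m.get? k = some v → m'.get? k = some v := by
  induction l generalizing m with
  | nil => simp [pvLoopB] at h; intro k v hk; rw [← h]; exact hk
  | cons p t ih =>
    obtain ⟨s, d⟩ := p
    rw [pvLoopB] at h
    split at h
    · exact absurd h (by simp)
    · intro k v hk
      refine ih _ h k v ?_
      by_cases hc : m.contains s = true
      · rw [PySem.Dict.setdefault_of_contains m d hc]; exact hk
      · rw [PySem.Dict.setdefault_of_not_contains m d (by simpa using hc)]
        have hks : k ≠ s := by
          intro he; rw [he] at hk
          rw [PySem.Dict.contains_eq_isSome_get?, hk] at hc; simp at hc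
        rw [PySem.Dict.get?_insert_of_ne m d hks]; exact hk

-- The main loop correspondence (unchanged from A's side): under the invariant, A's loop equals
-- the setdefault loop followed by a post-hoc injectivity check.
theorem pv_main (l : List (Char × Char)) (m u : PySem.Dict Char Char)
    (hinv : pvInv m u) (hm : m.keys.Nodup) (hu : u.keys.Nodup) :
    pvLoopA l m u = (match pvLoopB l m with
      | none => none
      | some m' => if (PySem.Set.ofList m'.values).length ≠ m'.values.length then none
                   else some m') := by
  induction l generalizing m u with
  | nil =>
    rw [pvLoopA, pvLoopB]
    have hnd := pv_values_nodup m u hinv hm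
    simp [PySem.Set.ofList_eq_self_of_nodup _ hnd]
  | cons p t ih =>
    obtain ⟨s, d⟩ := p
    rw [pvLoopA, pvLoopB]
    cases hms : m.get? s with
    | some d' =>
      have hc : m.contains s = true := by
        rw [PySem.Dict.contains_eq_isSome_get?, hms]; rfl
      by_cases hd : d' = d
      · have hms' : m.get? s = some d := hd ▸ hms
        rw [if_neg (c := m.contains s = true ∧ (some d' : Option Char) ≠ some d)
            (by simp [hd]),
          if_neg (c := m.contains s = false ∧ u.contains d = true ∧ u.get? d ≠ some s)
            (by simp [hc]),
          if_neg (c := (some d' : Option Char).getD d ≠ d) (by simp [hd]),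
          PySem.Dict.setdefault_of_contains m d hc,
          pv_insert_noop m s d hm hms', pv_insert_noop u d s hu ((hinv s d).mp hms')]
        exact ih m u hinv hm hu
      · rw [if_pos (c := m.contains s = true ∧ (some d' : Option Char) ≠ some d)
            ⟨hc, by simp [hd]⟩,
          if_pos (c := (some d' : Option Char).getD d ≠ d) (by simp [hd])]
    | none =>
      have hc : m.contains s = false := by
        rw [PySem.Dict.contains_eq_isSome_get?, hms]; rfl
      rw [if_neg (c := (none : Option Char).getD d ≠ d) (by simp),
        PySem.Dict.setdefault_of_not_contains m d hc,
        if_neg (c := m.contains s = true ∧ (none : Option Char) ≠ some d) (by simp [hc])]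
      cases hud : u.get? d with
      | some s' =>
        have hss : s' ≠ s := by
          intro he; rw [he] at hud
          rw [(hinv s d).mpr hud] at hms; cases hms
        have huc : u.contains d = true := by
          rw [PySem.Dict.contains_eq_isSome_get?, hud]; rfl
        rw [if_pos (c := m.contains s = false ∧ u.contains d = true ∧ (some s' : Option Char) ≠ some s)
          ⟨hc, huc, by simp [hss]⟩]
        cases hB : pvLoopB t (m.insert s d) with
        | none => simp
        | some m' =>
          have h1 : m'.get? s = some d :=
            pv_loopB_mono t _ m' hB s d (by rw [PySem.Dict.get?_insert]; simp)
          have h2 : m'.get? s' = some d :=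
            pv_loopB_mono t _ m' hB s' d
              (by rw [PySem.Dict.get?_insert_of_ne m d hss]; exact (hinv s' d).mpr hud)
          have hnodup : ¬ m'.values.Nodup := by
            intro hn
            have hi1 := PySem.Dict.mem_items_of_get?_eq_some m' h1
            have hi2 := PySem.Dict.mem_items_of_get?_eq_some m' h2
            have := List.inj_on_of_nodup_map (f := Prod.snd)
              (by simpa [PySem.Dict.values] using hn) hi1 hi2 rfl
            exact hss (congrArg Prod.fst this).symm
          have hlen : (PySem.Set.ofList m'.values).length ≠ m'.values.length :=
            fun h => hnodup (pv_nodup_of_len _ h)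
          simp [if_pos hlen]
      | none =>
        have huc : u.contains d = false := by
          rw [PySem.Dict.contains_eq_isSome_get?, hud]; rfl
        rw [if_neg (c := m.contains s = false ∧ u.contains d = true ∧ (none : Option Char) ≠ some s)
          (by simp [huc])]
        refine ih (m.insert s d) (u.insert d s) ?_ (PySem.Dict.nodup_keys_insert m s d hm)
          (PySem.Dict.nodup_keys_insert u d s hu)
        intro x y
        rw [PySem.Dict.get?_insert, PySem.Dict.get?_insert]
        by_cases hx : x = s <;> by_cases hy : y = d
        · simp [hx, hy]
        · simp only [if_pos hx, if_neg hy]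
          constructor
          · intro h; exact absurd (Option.some.inj h).symm hy
          · intro h
            have := (hinv x y).mpr h
            rw [hx, hms] at this; cases this
        · simp only [if_neg hx, if_pos hy]
          constructor
          · intro h
            have := (hinv x y).mp h
            rw [hy, hud] at this; cases this
          · intro h; exact absurd (Option.some.inj h).symm hx
        · simp only [if_neg hx, if_neg hy]
          exact hinv x y

-- Generalized bulk fold: fold inserts into an arbitrary start dict.
def pvFoldIns (l : List (Char × Char)) (m : PySem.Dict Char Char) : PySem.Dict Char Char :=
  l.foldl (fun m p => m.insert p.1 p.2) m

theorem pvDictOf_eq (l : List (Char × Char)) : pvDictOf l = pvFoldIns l PySem.Dict.empty := rfl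

-- A dict with Nodup keys is functional as a pair list.
theorem pv_items_fnP (m : PySem.Dict Char Char) (hnd : m.keys.Nodup) : pvFnP m.items := by
  intro p hp q hq hpq
  have := List.inj_on_of_nodup_map (f := Prod.fst) (by simpa [PySem.Dict.keys] using hnd) hp hq hpq
  exact congrArg Prod.snd this

-- The setdefault loop succeeds iff the accumulated pair list is functional, and then the
-- resulting dict is the bulk fold.
theorem pv_loopB_eq (l : List (Char × Char)) (m : PySem.Dict Char Char) (hnd : m.keys.Nodup) :
    pvLoopB l m = if pvFn (m.items ++ l) = true then some (pvFoldIns l m) else none := by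
  induction l generalizing m with
  | nil =>
    rw [pvLoopB]
    rw [if_pos ((pvFn_iff _).mpr (by simpa using pv_items_fnP m hnd))]
    rfl
  | cons p t ih =>
    obtain ⟨s, d⟩ := p
    rw [pvLoopB]
    cases hms : m.get? s with
    | some d' =>
      have hc : m.contains s = true := by
        rw [PySem.Dict.contains_eq_isSome_get?, hms]; rfl
      have hmem : (s, d') ∈ m.items := PySem.Dict.mem_items_of_get?_eq_some m hms
      by_cases hd : d' = d
      · rw [if_neg (c := (some d' : Option Char).getD d ≠ d) (by simp [hd]),
          PySem.Dict.setdefault_of_contains m d hc, ih m hnd]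
        have hnoop : m.insert s d = m := pv_insert_noop m s d hnd (hd ▸ hms)
        have hcond : pvFn (m.items ++ t) = pvFn (m.items ++ (s, d) :: t) := by
          rw [Bool.eq_iff_iff, pvFn_iff, pvFn_iff]
          refine pvFnP_congr _ _ ?_
          intro a
          constructor
          · intro ha
            rcases List.mem_append.mp ha with h | h
            · exact List.mem_append.mpr (Or.inl h)
            · exact List.mem_append.mpr (Or.inr (List.mem_cons_of_mem _ h))
          · intro ha
            rcases List.mem_append.mp ha with h | h
            · exact List.mem_append.mpr (Or.inl h)
            · rcases List.mem_cons.mp h with h | h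
              · subst h; exact List.mem_append.mpr (Or.inl (hd ▸ hmem))
              · exact List.mem_append.mpr (Or.inr h)
        rw [hcond]
        have : pvFoldIns t m = pvFoldIns ((s, d) :: t) m := by
          simp [pvFoldIns, hnoop]
        rw [this]
      · rw [if_pos (c := (some d' : Option Char).getD d ≠ d) (by simp [hd])]
        have hf : pvFn (m.items ++ (s, d) :: t) = false := by
          rw [Bool.eq_false_iff]
          intro h
          have H := (pvFn_iff _).mp h
          exact hd (H (s, d') (List.mem_append.mpr (Or.inl hmem))
            (s, d) (List.mem_append.mpr (Or.inr (List.mem_cons_self))) rfl)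
        rw [hf]
        simp
    | none =>
      have hc : m.contains s = false := by
        rw [PySem.Dict.contains_eq_isSome_get?, hms]; rfl
      rw [if_neg (c := (none : Option Char).getD d ≠ d) (by simp),
        PySem.Dict.setdefault_of_not_contains m d hc,
        ih (m.insert s d) (PySem.Dict.nodup_keys_insert m s d hnd)]
      have hitems : (m.insert s d).items = m.items ++ [(s, d)] :=
        PySem.Dict.items_insert_of_not_contains m d (by simpa using hc)
      have hcond : pvFn ((m.insert s d).items ++ t) = pvFn (m.items ++ (s, d) :: t) := by
        rw [Bool.eq_iff_iff, pvFn_iff, pvFn_iff]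
        refine pvFnP_congr _ _ ?_
        intro a
        simp [hitems]
      rw [hcond]
      rfl

-- get? of the bulk fold: a binding comes from the list or from the start dict.
theorem pv_foldIns_get?_mem (l : List (Char × Char)) (m : PySem.Dict Char Char) (k v : Char)
    (h : (pvFoldIns l m).get? k = some v) : (k, v) ∈ l ∨ m.get? k = some v := by
  induction l generalizing m with
  | nil => exact Or.inr h
  | cons p t ih =>
    rcases ih (m.insert p.1 p.2) h with h1 | h1
    · exact Or.inl (List.mem_cons_of_mem _ h1)
    · by_cases hk : k = p.1
      · subst hk
        rw [PySem.Dict.get?_insert_self] at h1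
        exact Or.inl (List.mem_cons.mpr (Or.inl (Prod.ext rfl (Option.some.inj h1).symm)))
      · rw [PySem.Dict.get?_insert_of_ne m p.2 hk] at h1
        exact Or.inr h1

-- a binding in the start dict survives the bulk fold as a bound key.
theorem pv_foldIns_mono_isSome (l : List (Char × Char)) (m : PySem.Dict Char Char) (k : Char)
    (h : (m.get? k).isSome) : ((pvFoldIns l m).get? k).isSome := by
  induction l generalizing m with
  | nil => exact h
  | cons q t ih =>
    refine ih (m.insert q.1 q.2) ?_
    by_cases hk : k = q.1
    · subst hk; rw [PySem.Dict.get?_insert_self]; rfl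
    · rw [PySem.Dict.get?_insert_of_ne m q.2 hk]; exact h

-- every key of the list is bound in the bulk fold.
theorem pv_foldIns_isSome (l : List (Char × Char)) (m : PySem.Dict Char Char) (p : Char × Char)
    (hp : p ∈ l) : ((pvFoldIns l m).get? p.1).isSome := by
  induction l generalizing m with
  | nil => cases hp
  | cons q t ih =>
    rcases List.mem_cons.mp hp with h | h
    · subst h
      refine pv_foldIns_mono_isSome t (m.insert p.1 p.2) p.1 ?_
      rw [PySem.Dict.get?_insert_self]; rfl
    · exact ih (m.insert q.1 q.2) h

-- the bulk fold from empty has Nodup keys.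
theorem pv_dictOf_nodup (l : List (Char × Char)) : (pvDictOf l).keys.Nodup := by
  have : (pvDictOf l).keys.Nodup := by
    rw [pvDictOf]
    exact PySem.Dict.nodup_keys_foldl_insert_key l Prod.fst (fun d p => p.2) PySem.Dict.empty
      (by simp [PySem.Dict.keys_empty])
  exact this

-- B's all-check on dict(pairs) is exactly functionality of the pair list.
theorem pv_allcheck_iff (l : List (Char × Char)) :
    (l.all (fun p => (pvDictOf l).get? p.1 == some p.2) = true) ↔ pvFnP l := by
  rw [List.all_eq_true]
  constructor
  · intro H p hp q hq hpq
    have h1 := (beq_iff_eq).mp (H p hp)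
    have h2 := (beq_iff_eq).mp (H q hq)
    rw [hpq] at h1
    rw [h1] at h2
    exact Option.some.inj h2
  · intro H p hp
    rw [beq_iff_eq]
    obtain ⟨v, hv⟩ := Option.isSome_iff_exists.mp (pv_foldIns_isSome l PySem.Dict.empty p hp)
    rcases pv_foldIns_get?_mem l PySem.Dict.empty p.1 v hv with h | h
    · rw [pvDictOf_eq, hv]
      exact congrArg some (H (p.1, v) h p hp rfl)
    · rw [PySem.Dict.get?_empty] at h; cases h

-- membership in values of dict(pairs) = membership in the second components, under functionality.
theorem pv_values_mem (l : List (Char × Char)) (hfn : pvFnP l) (d : Char) :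
    d ∈ (pvDictOf l).values ↔ d ∈ l.map Prod.snd := by
  constructor
  · intro hd
    obtain ⟨a, ha⟩ : ∃ a, (a, d) ∈ (pvDictOf l).items := by simpa [PySem.Dict.values] using hd
    have hget : (pvDictOf l).get? a = some d :=
      PySem.Dict.get?_of_mem_items _ ha (pv_dictOf_nodup l)
    rcases pv_foldIns_get?_mem l PySem.Dict.empty a d hget with h | h
    · exact List.mem_map.mpr ⟨(a, d), h, rfl⟩
    · rw [PySem.Dict.get?_empty] at h; cases h
  · intro hd
    obtain ⟨p, hp, hpd⟩ := List.mem_map.mp hd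
    obtain ⟨v, hv⟩ := Option.isSome_iff_exists.mp (pv_foldIns_isSome l PySem.Dict.empty p hp)
    rcases pv_foldIns_get?_mem l PySem.Dict.empty p.1 v hv with h | h
    · have hvp : v = p.2 := hfn (p.1, v) h p hp rfl
      subst hvp
      have hmem := PySem.Dict.mem_items_of_get?_eq_some (pvDictOf l) (by rw [pvDictOf_eq]; exact hv)
      rw [← hpd]
      simp only [PySem.Dict.values, List.mem_map]
      exact ⟨(p.1, p.2), hmem, rfl⟩
    · rw [PySem.Dict.get?_empty] at h; cases h

-- keys of dict(pairs) as a set: the distinct first components.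
theorem pv_keys_mem (l : List (Char × Char)) (k : Char) :
    k ∈ (pvDictOf l).keys ↔ k ∈ l.map Prod.fst := by
  constructor
  · intro hk
    obtain ⟨x, hx⟩ : ∃ x, (k, x) ∈ (pvDictOf l).items := by simpa [PySem.Dict.keys] using hk
    have hget : (pvDictOf l).get? k = some x :=
      PySem.Dict.get?_of_mem_items _ hx (pv_dictOf_nodup l)
    rcases pv_foldIns_get?_mem l PySem.Dict.empty k x hget with h | h
    · exact List.mem_map.mpr ⟨(k, x), h, rfl⟩
    · rw [PySem.Dict.get?_empty] at h; cases h
  · intro hk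
    obtain ⟨p, hp, hpk⟩ := List.mem_map.mp hk
    obtain ⟨v, hv⟩ := Option.isSome_iff_exists.mp (pv_foldIns_isSome l PySem.Dict.empty p hp)
    have hmem := PySem.Dict.mem_items_of_get?_eq_some (pvDictOf l) (by rw [pvDictOf_eq]; exact hv)
    rw [← hpk]
    simp only [PySem.Dict.keys, List.mem_map]
    exact ⟨(p.1, v), hmem, rfl⟩

-- first components of zip a b = second components of zip b a.
theorem pv_zip_fst_snd (a b : List Char) :
    (a.zip b).map Prod.fst = (b.zip a).map Prod.snd := by
  induction a generalizing b with
  | nil => cases b <;> simp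
  | cons x t ih =>
    cases b with
    | nil => simp
    | cons y u => simp [ih u]

-- two Nodup lists with the same members have equal length.
theorem pv_len_eq_of_mem_iff (xs ys : List Char) (hx : xs.Nodup) (hy : ys.Nodup)
    (h : ∀ a, a ∈ xs ↔ a ∈ ys) : xs.length = ys.length :=
  List.Perm.length_eq ((List.perm_ext_iff_of_nodup hx hy).mpr h)

-- Under functionality, B's length check equals the values-Nodup check.
theorem pv_lencheck_iff (sl dl : List Char) (hfn : pvFnP (sl.zip dl)) :
    ((pvDictOf (sl.zip dl)).items.length == (pvDictOf (dl.zip sl)).items.length) = true ↔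
    (pvDictOf (sl.zip dl)).values.Nodup := by
  have hM := pv_dictOf_nodup (sl.zip dl)
  have hR := pv_dictOf_nodup (dl.zip sl)
  have hvlen : (pvDictOf (sl.zip dl)).values.length = (pvDictOf (sl.zip dl)).items.length := by
    simp [PySem.Dict.values]
  have hklen : (pvDictOf (dl.zip sl)).keys.length = (pvDictOf (dl.zip sl)).items.length := by
    simp [PySem.Dict.keys]
  have hset : (PySem.Set.ofList (pvDictOf (sl.zip dl)).values).length =
      (pvDictOf (dl.zip sl)).keys.length := by
    refine pv_len_eq_of_mem_iff _ _ (PySem.Set.nodup_ofList _) hR ?_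
    intro a
    rw [PySem.Set.mem_ofList, pv_values_mem _ hfn, pv_keys_mem, ← pv_zip_fst_snd]
  rw [beq_iff_eq]
  constructor
  · intro h
    refine pv_nodup_of_len _ ?_
    rw [hset, hklen, ← h, ← hvlen]
  · intro h
    rw [← hvlen, ← hklen, ← hset, PySem.Set.ofList_eq_self_of_nodup _ h]

-- the assembled correspondence on char lists.
theorem pv_final (sl dl : List Char) :
    (pvLoopA (sl.zip dl) PySem.Dict.empty PySem.Dict.empty).map
      (fun m => m.items.map (fun p => (p.1.toString, p.2.toString))) =
    (if (sl.zip dl).all (fun p => (pvDictOf (sl.zip dl)).get? p.1 == some p.2) &&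
        ((pvDictOf (sl.zip dl)).items.length == (pvDictOf (dl.zip sl)).items.length)
     then some ((pvDictOf (sl.zip dl)).items.map (fun p => (p.1.toString, p.2.toString)))
     else none) := by
  have hA := pv_main (sl.zip dl) PySem.Dict.empty PySem.Dict.empty
    (by intro s d; simp [PySem.Dict.get?_empty])
    (by simp [PySem.Dict.keys_empty])
    (by simp [PySem.Dict.keys_empty])
  have hB := pv_loopB_eq (sl.zip dl) PySem.Dict.empty (by simp [PySem.Dict.keys_empty])
  rw [hA, hB, ← pvDictOf_eq]
  have hpre : (PySem.Dict.empty.items ++ sl.zip dl) = sl.zip dl := rfl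
  rw [hpre]
  by_cases hfn : pvFnP (sl.zip dl)
  · rw [if_pos ((pvFn_iff _).mpr hfn)]
    have h2 := (pv_allcheck_iff (sl.zip dl)).mpr hfn
    by_cases hnd : (pvDictOf (sl.zip dl)).values.Nodup
    · have h3 := (pv_lencheck_iff sl dl hfn).mpr hnd
      have h4 : (PySem.Set.ofList (pvDictOf (sl.zip dl)).values).length =
          (pvDictOf (sl.zip dl)).values.length := by
        rw [PySem.Set.ofList_eq_self_of_nodup _ hnd]
      simp [h2, h3, h4]
    · have h3 : ((pvDictOf (sl.zip dl)).items.length ==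
          (pvDictOf (dl.zip sl)).items.length) = false := by
        rw [Bool.eq_false_iff]
        intro h
        exact hnd ((pv_lencheck_iff sl dl hfn).mp h)
      have h4 : (PySem.Set.ofList (pvDictOf (sl.zip dl)).values).length ≠
          (pvDictOf (sl.zip dl)).values.length := fun h => hnd (pv_nodup_of_len _ h)
      simp [h3, h4]
  · rw [if_neg (fun h => hfn ((pvFn_iff _).mp h))]
    have h2 : ((sl.zip dl).all (fun p => (pvDictOf (sl.zip dl)).get? p.1 == some p.2)) = false := by
      rw [Bool.eq_false_iff]
      intro h
      exact hfn ((pv_allcheck_iff (sl.zip dl)).mp h)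
    simp [h2]

-- ===== VERDICT (by name: the statement is the Claim_ definition above) =====
theorem core_make_symbol_map_spec : Claim_equal_core_make_symbol_map := by
  intro s d _
  unfold Spec_core_make_symbol_map core_make_symbol_map core_make_symbol_map_alt
  exact pv_final s.toList d.toList
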